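-- pv_equiv track=rewrite | github.com/phord/AdventOfCode2023 | src/day19.py | disjoint_1xn
-- ===== SOURCE A (Python) =====
-- def split(r1, r2):
--     mn1,mx1 = r1
--     mn2,mx2 = r2
--
--     # Common range
--     c1 = max(mn1, mn2)
--     c2 = min(mx1, mx2)
--     if c1 <= c2:
--         left = [ a for a in [(mn1, c1), (c2, mx1), (c1,c2+1)] if a[0] <= a[1]]
--         return left
--     else:
--         return [r1]
--
-- def disjoint(p1, p2):
--     left = split(p1[0], p2[0])
--     if len(p1) == 1:
--         return [[a] for a in left]
--
--     lr = disjoint(p1[1:], p2[1:])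
--     a = []
--     for l in left:
--         for l2 in lr:
--             a.append([l] + l2)
--     return a
--
-- def disjoint_1xn(p1, paths):
--     pp = set([tuple(p1)])
--
--     for path in paths:
--         next = set()
--         for p in pp:
--             left = disjoint(p, path)
--             for a in left:
--                 next.add(tuple(a))
--         pp = next
--
--     # ## Validate pp
--     # a = count(p1)
--     # b = 0
--     # for p in pp:
--     #     b += count(p)
--     # assert a == b
--
--     return pp
-- ===== SOURCE B (Python) =====
-- def split(r1, r2):
--     mn1, mx1 = r1
--     mn2, mx2 = r2
--     c1 = max(mn1, mn2)
--     c2 = min(mx1, mx2)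
--     if c1 <= c2:
--         return [a for a in [(mn1, c1), (c2, mx1), (c1, c2 + 1)] if a[0] <= a[1]]
--     else:
--         return [r1]
--
--
-- def disjoint_1xn(p1, paths):
--     pp = {tuple(p1)}
--     for path in paths:
--         nxt = set()
--         for p in pp:
--             # precompute the per-dimension splits table, then take its
--             # cartesian product iteratively instead of recursing per dimension
--             splits = [split(p[i], path[i]) for i in range(len(p))]
--             combos = [()]
--             for s in splits:
--                 combos = [c + (x,) for c in combos for x in s]
--             for c in combos:
--                 nxt.add(c)
--         pp = nxt
--     return pp
-- ===== Notes on version B (the rewrite author's own statement) =====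
-- stated objective: idiomatic
-- what changed: Replaces the dimension-by-dimension recursion of disjoint() with a precomputed per-dimension splits table whose cartesian product is accumulated iteratively.
import Mathlib
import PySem

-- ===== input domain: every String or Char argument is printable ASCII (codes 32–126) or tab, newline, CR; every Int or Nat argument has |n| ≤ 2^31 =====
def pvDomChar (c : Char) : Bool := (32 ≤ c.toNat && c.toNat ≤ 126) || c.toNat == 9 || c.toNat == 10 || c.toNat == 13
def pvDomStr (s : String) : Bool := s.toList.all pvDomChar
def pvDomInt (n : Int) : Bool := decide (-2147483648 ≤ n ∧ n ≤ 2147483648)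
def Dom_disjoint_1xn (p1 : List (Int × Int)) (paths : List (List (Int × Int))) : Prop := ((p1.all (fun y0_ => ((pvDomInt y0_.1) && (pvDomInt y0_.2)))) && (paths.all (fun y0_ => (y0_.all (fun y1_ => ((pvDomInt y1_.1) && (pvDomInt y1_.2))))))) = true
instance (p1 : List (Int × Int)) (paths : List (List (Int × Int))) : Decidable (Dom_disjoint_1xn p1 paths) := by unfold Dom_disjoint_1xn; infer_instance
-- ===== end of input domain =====

-- B replaces the per-dimension recursion of `disjoint` with a precomputed splits
-- table whose cartesian product is accumulated iteratively (objective: idiomatic).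
-- The return value is a Python set; it is modelled as a PySem.Set (insertion order).

-- ===== PORT A =====
-- shared helper: `split` is identical in Source A and Source B
def splitRange (r1 r2 : Int × Int) : List (Int × Int) :=
  let c1 := max r1.1 r2.1
  let c2 := min r1.2 r2.2
  if c1 ≤ c2 then
    ([(r1.1, c1), (c2, r1.2), (c1, c2 + 1)]).filter (fun a => a.1 ≤ a.2)
  else [r1]

-- `disjoint` of Source A; the `_, _` case is Python's IndexError (excluded by Pre_)
def disjointRec : List (Int × Int) → List (Int × Int) → List (List (Int × Int))
  | x :: xs, y :: ys =>
      let left := splitRange x y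
      if xs.isEmpty then left.map (fun a => [a])
      else
        let lr := disjointRec xs ys
        left.foldl (fun a l => lr.foldl (fun a l2 => a ++ [l :: l2]) a) []
  | _, _ => []

def disjoint_1xn (p1 : List (Int × Int)) (paths : List (List (Int × Int))) : List (List (Int × Int)) :=
  let pp : PySem.Set (List (Int × Int)) := PySem.Set.ofList [p1]
  paths.foldl (fun pp path =>
    pp.foldl (fun next p =>
      (disjointRec p path).foldl (fun next a => PySem.Set.add next a) next)
      PySem.Set.empty) pp

-- ===== PORT B =====
def disjoint_1xn_alt (p1 : List (Int × Int)) (paths : List (List (Int × Int))) : List (List (Int × Int)) :=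
  paths.foldl (fun pp path =>
    pp.foldl (fun nxt p =>
      let splits := (List.range p.length).map (fun (i : Nat) =>
        splitRange (PySem.List.pyGetD p (i : Int) (0, 0)) (PySem.List.pyGetD path (i : Int) (0, 0)))
      let combos := splits.foldl
        (fun combos s => combos.flatMap (fun c => s.map (fun x => c ++ [x]))) [[]]
      combos.foldl (fun nxt c => PySem.Set.add nxt c) nxt)
      PySem.Set.empty)
    (PySem.Set.ofList [p1])

-- ===== PRECONDITION & SPEC =====
-- Pre_ excludes exactly the inputs where A raises IndexError: an empty p1 with a
-- nonempty paths, or some path shorter than p1 (disjoint indexes p2[0] per dimension).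
def Pre_disjoint_1xn (p1 : List (Int × Int)) (paths : List (List (Int × Int))) : Prop :=
  (p1 = [] → paths = []) ∧ ∀ path ∈ paths, p1.length ≤ path.length
instance (p1 : List (Int × Int)) (paths : List (List (Int × Int))) : Decidable (Pre_disjoint_1xn p1 paths) := by unfold Pre_disjoint_1xn; infer_instance

def pvWitness_disjoint_1xn : (List (Int × Int)) × (List (List (Int × Int))) :=
  ([(1, 5)], [[(2, 3)]])

def Spec_disjoint_1xn (p1 : List (Int × Int)) (paths : List (List (Int × Int))) (out : List (List (Int × Int))) : Prop := out = disjoint_1xn_alt p1 paths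
instance (p1 : List (Int × Int)) (paths : List (List (Int × Int))) (out : List (List (Int × Int))) : Decidable (Spec_disjoint_1xn p1 paths out) := by unfold Spec_disjoint_1xn; infer_instance

-- ===== CLAIM (what is proved, stated in full; the proofs are below) =====
def Claim_equal_disjoint_1xn : Prop := ∀ (p1 : List (Int × Int)) (paths : List (List (Int × Int))), Dom_disjoint_1xn p1 paths → Pre_disjoint_1xn p1 paths → Spec_disjoint_1xn p1 paths (disjoint_1xn p1 paths)

-- ===== LEMMAS AND PROOFS =====

theorem flatten_map_singleton {α β : Type} (f : α → β) (l : List α) :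
    (l.map (fun x => [f x])).flatten = l.map f := by
  induction l <;> simp_all

-- reference cartesian product (prepend form), used only in proofs
def prodR : List (List (Int × Int)) → List (List (Int × Int))
  | [] => [[]]
  | s :: rest => s.flatMap (fun x => (prodR rest).map (x :: ·))

theorem disjointRec_eq_prodR : ∀ (p path : List (Int × Int)), p ≠ [] →
    p.length ≤ path.length →
    disjointRec p path = prodR ((p.zip path).map (fun ab => splitRange ab.1 ab.2)) := by
  intro p
  induction p with
  | nil => intro _ h; exact absurd rfl h
  | cons x xs ih =>
    intro path _ hlen
    cases path with
    | nil => simp at hlen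
    | cons y ys =>
      by_cases hxs : xs = []
      · subst hxs
        simp [disjointRec, prodR, List.flatMap, flatten_map_singleton (fun a => [a])]
      · have hlen' : xs.length ≤ ys.length := by simpa using hlen
        have hrec := ih ys hxs hlen'
        simp only [disjointRec, prodR, List.zip_cons_cons, List.map_cons]
        rw [if_neg (by simp [hxs])]
        rw [← hrec]
        -- nested append-folds become flatMap/map
        calc (splitRange x y).foldl
              (fun a l => (disjointRec xs ys).foldl (fun a l2 => a ++ [l :: l2]) a) []
            = (splitRange x y).foldl
              (fun a l => a ++ (disjointRec xs ys).flatMap (fun l2 => [l :: l2])) [] := by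
              apply PySem.List.foldl_congr_mem
              intro acc l _
              exact PySem.List.foldl_append_eq_flatMap (fun l2 => [l :: l2]) _ _
          _ = (splitRange x y).flatMap
              (fun l => (disjointRec xs ys).flatMap (fun l2 => [l :: l2])) := by
              simpa using PySem.List.foldl_append_eq_flatMap
                (fun l => (disjointRec xs ys).flatMap (fun l2 => [l :: l2]))
                (splitRange x y) []
          _ = (splitRange x y).flatMap
              (fun l => (disjointRec xs ys).map (fun l2 => l :: l2)) := by
              simp [List.flatMap, flatten_map_singleton]

theorem range_map_getD_eq_zip {α β : Type} (g : α → α → β) (d : α) :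
    ∀ (p path : List α), p.length ≤ path.length →
    (List.range p.length).map (fun (i : Nat) => g (p.getD i d) (path.getD i d))
      = (p.zip path).map (fun ab => g ab.1 ab.2) := by
  intro p
  induction p with
  | nil => intro path _; simp
  | cons x xs ih =>
    intro path hlen
    cases path with
    | nil => simp at hlen
    | cons y ys =>
      have := ih ys (by simpa using hlen)
      simp only [List.length_cons, List.range_succ_eq_map, List.map_cons, List.map_map]
      simpa [Function.comp_def] using this

theorem foldl_prod_eq (splits : List (List (Int × Int))) :
    ∀ acc : List (List (Int × Int)),
    splits.foldl (fun combos s => combos.flatMap (fun c => s.map (fun x => c ++ [x]))) acc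
      = acc.flatMap (fun c => (prodR splits).map (c ++ ·)) := by
  induction splits with
  | nil => intro acc; simp [prodR]
  | cons s rest ih =>
    intro acc
    simp only [List.foldl_cons, ih, prodR]
    simp only [List.flatMap_assoc, List.flatMap_map, List.map_flatMap, List.map_map]
    simp [Function.comp_def]

theorem combos_eq_prodR (splits : List (List (Int × Int))) :
    splits.foldl (fun combos s => combos.flatMap (fun c => s.map (fun x => c ++ [x]))) [[]]
      = prodR splits := by
  simp [foldl_prod_eq]

theorem mem_prodR_length {a : List (Int × Int)} :
    ∀ {splits : List (List (Int × Int))}, a ∈ prodR splits → a.length = splits.length := by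
  intro splits
  induction splits generalizing a with
  | nil => intro h; simp [prodR] at h; simp [h]
  | cons s rest ih =>
    intro h
    simp only [prodR, List.mem_flatMap, List.mem_map] at h
    obtain ⟨x, _, t, ht, rfl⟩ := h
    simp [ih ht]

theorem mem_foldl_add {l : List (List (Int × Int))} {s : PySem.Set (List (Int × Int))}
    {q : List (Int × Int)} :
    q ∈ l.foldl (fun s a => PySem.Set.add s a) s → q ∈ s ∨ q ∈ l := by
  induction l generalizing s with
  | nil => intro h; exact Or.inl h
  | cons a t ih =>
    intro h
    rcases ih h with h' | h'
    · rcases (PySem.Set.mem_add _ _ _).1 h' with h'' | h''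
      · exact Or.inl h''
      · exact Or.inr (by simp [h''])
    · exact Or.inr (by simp [h'])

-- one outer step: the two inner loops over pp agree, given all pieces have length n
theorem step_eq (path : List (Int × Int)) (n : Nat) (hn : 0 < n)
    (hpath : n ≤ path.length) :
    ∀ (pp : PySem.Set (List (Int × Int))), (∀ p ∈ pp, p.length = n) →
    pp.foldl (fun next p =>
      (disjointRec p path).foldl (fun next a => PySem.Set.add next a) next)
      PySem.Set.empty
    = pp.foldl (fun nxt p =>
      ((List.range p.length).map (fun (i : Nat) =>
        splitRange (PySem.List.pyGetD p (i : Int) (0, 0)) (PySem.List.pyGetD path (i : Int) (0, 0)))).foldl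
        (fun combos s => combos.flatMap (fun c => s.map (fun x => c ++ [x]))) [[]]
        |>.foldl (fun nxt c => PySem.Set.add nxt c) nxt)
      PySem.Set.empty := by
  intro pp hpp
  apply PySem.List.foldl_congr_mem
  intro acc p hp
  have hlen := hpp p hp
  have hne : p ≠ [] := by intro h; subst h; simp at hlen; omega
  have hsplits : (List.range p.length).map (fun (i : Nat) =>
      splitRange (PySem.List.pyGetD p (i : Int) (0, 0)) (PySem.List.pyGetD path (i : Int) (0, 0)))
      = (p.zip path).map (fun ab => splitRange ab.1 ab.2) := by
    simp only [PySem.List.pyGetD_natCast]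
    exact range_map_getD_eq_zip splitRange (0, 0) p path (by omega)
  rw [hsplits, combos_eq_prodR, ← disjointRec_eq_prodR p path hne (by omega)]

theorem pieces_length {p path : List (Int × Int)} {n : Nat} (hn : 0 < n)
    (hp : p.length = n) (hpath : n ≤ path.length) :
    ∀ a ∈ disjointRec p path, a.length = n := by
  intro a ha
  have hne : p ≠ [] := by intro h; subst h; simp at hp; omega
  rw [disjointRec_eq_prodR p path hne (by omega)] at ha
  have := mem_prodR_length ha
  rw [this]
  simp [List.length_zip]
  omega

theorem main_fold (n : Nat) (hn : 0 < n) :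
    ∀ (paths : List (List (Int × Int))) (pp : PySem.Set (List (Int × Int))),
    (∀ p ∈ pp, p.length = n) → (∀ path ∈ paths, n ≤ path.length) →
    paths.foldl (fun pp path =>
      pp.foldl (fun next p =>
        (disjointRec p path).foldl (fun next a => PySem.Set.add next a) next)
        PySem.Set.empty) pp
    = paths.foldl (fun pp path =>
      pp.foldl (fun nxt p =>
        ((List.range p.length).map (fun (i : Nat) =>
        splitRange (PySem.List.pyGetD p (i : Int) (0, 0)) (PySem.List.pyGetD path (i : Int) (0, 0)))).foldl
          (fun combos s => combos.flatMap (fun c => s.map (fun x => c ++ [x]))) [[]]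
          |>.foldl (fun nxt c => PySem.Set.add nxt c) nxt)
        PySem.Set.empty) pp := by
  intro paths
  induction paths with
  | nil => intro pp _ _; rfl
  | cons path rest ih =>
    intro pp hpp hpaths
    have hpath : n ≤ path.length := hpaths path (by simp)
    simp only [List.foldl_cons]
    rw [← step_eq path n hn hpath pp hpp]
    apply ih
    · -- invariant preserved by one A-step
      intro q hq
      clear ih
      have : ∀ (s0 : PySem.Set (List (Int × Int))) (l : List (List (Int × Int))),
          (∀ p ∈ l, p.length = n) → (∀ r ∈ s0, r.length = n) →
          ∀ q ∈ l.foldl (fun next p =>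
            (disjointRec p path).foldl (fun next a => PySem.Set.add next a) next) s0,
          q.length = n := by
        intro s0 l
        induction l generalizing s0 with
        | nil => intro _ hs0 q hq; exact hs0 q hq
        | cons p t iht =>
          intro hl hs0 q hq
          simp only [List.foldl_cons] at hq
          refine iht _ (fun r hr => hl r (by simp [hr])) ?_ q hq
          intro r hr
          rcases mem_foldl_add hr with h | h
          · exact hs0 r h
          · exact pieces_length hn (hl p (by simp)) hpath r h
      exact this PySem.Set.empty pp hpp (by intro r hr; simp [PySem.Set.empty] at hr) q hq
    · intro path' h; exact hpaths path' (by simp [h])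

-- ===== VERDICT (by name: the statement is the Claim_ definition above) =====
theorem disjoint_1xn_spec : Claim_equal_disjoint_1xn := by
  intro p1 paths _ hpre
  unfold Spec_disjoint_1xn disjoint_1xn disjoint_1xn_alt
  by_cases h1 : p1 = []
  · have : paths = [] := hpre.1 h1
    subst this; rfl
  · have hn : 0 < p1.length := by cases p1 <;> simp_all
    exact main_fold p1.length hn paths (PySem.Set.ofList [p1])
      (by intro p hp; simp [PySem.Set.mem_ofList] at hp; simp [hp]) hpre.2
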